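-- pv_equiv track=rewrite | github.com/DeveloperMODE-korea/Reversecore_MCP | reversecore_mcp/tools/game_analysis.py | _categorize_packet
-- ===== SOURCE A (Python) =====
-- def _categorize_packet(packet_name: str) -> str:
--     """Categorize a packet based on its name."""
--     name_lower = packet_name.lower()
--
--     if any(k in name_lower for k in ["move", "pos", "position", "coord", "location"]):
--         return "movement"
--     elif any(k in name_lower for k in ["chat", "msg", "whisper", "say", "shout"]):
--         return "chat"
--     elif any(k in name_lower for k in ["skill", "cast", "spell", "ability"]):
--         return "combat"
--     elif any(k in name_lower for k in ["item", "inventory", "equip", "loot"]):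
--         return "inventory"
--     elif any(k in name_lower for k in ["login", "auth", "logout", "connect"]):
--         return "authentication"
--     elif any(k in name_lower for k in ["npc", "quest", "shop", "trade"]):
--         return "interaction"
--     elif any(k in name_lower for k in ["party", "guild", "friend", "group"]):
--         return "social"
--     elif any(k in name_lower for k in ["zone", "map", "warp", "teleport"]):
--         return "world"
--     else:
--         return "unknown"
-- ===== SOURCE B (Python) =====
-- _CATEGORIES = ["movement", "chat", "combat", "inventory",
--                "authentication", "interaction", "social", "world"]
--
-- _KEYWORD_RANK = {
--     "move": 0, "pos": 0, "position": 0, "coord": 0, "location": 0,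
--     "chat": 1, "msg": 1, "whisper": 1, "say": 1, "shout": 1,
--     "skill": 2, "cast": 2, "spell": 2, "ability": 2,
--     "item": 3, "inventory": 3, "equip": 3, "loot": 3,
--     "login": 4, "auth": 4, "logout": 4, "connect": 4,
--     "npc": 5, "quest": 5, "shop": 5, "trade": 5,
--     "party": 6, "guild": 6, "friend": 6, "group": 6,
--     "zone": 7, "map": 7, "warp": 7, "teleport": 7,
-- }
--
--
-- def _categorize_packet(packet_name: str) -> str:
--     """Categorize a packet: scan every short substring of the lowered name
--     against a keyword->rank hash map, keeping the best (lowest) rank seen."""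
--     name_lower = packet_name.lower()
--     best = len(_CATEGORIES)
--     for i in range(len(name_lower)):
--         for length in range(3, 10):  # keyword lengths are 3..9
--             rank = _KEYWORD_RANK.get(name_lower[i:i + length])
--             if rank is not None and rank < best:
--                 best = rank
--     return _CATEGORIES[best] if best < len(_CATEGORIES) else "unknown"
-- ===== Notes on version B (the rewrite author's own statement) =====
-- stated objective: alternative
-- what changed: Replaces eight per-category substring scans with the inverse algorithm: enumerate every substring of length 3-9 of the lowered name and look it up in a keyword->rank hash map, keeping the minimum rank; the category list is indexed by that rank.
import Mathlib
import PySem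

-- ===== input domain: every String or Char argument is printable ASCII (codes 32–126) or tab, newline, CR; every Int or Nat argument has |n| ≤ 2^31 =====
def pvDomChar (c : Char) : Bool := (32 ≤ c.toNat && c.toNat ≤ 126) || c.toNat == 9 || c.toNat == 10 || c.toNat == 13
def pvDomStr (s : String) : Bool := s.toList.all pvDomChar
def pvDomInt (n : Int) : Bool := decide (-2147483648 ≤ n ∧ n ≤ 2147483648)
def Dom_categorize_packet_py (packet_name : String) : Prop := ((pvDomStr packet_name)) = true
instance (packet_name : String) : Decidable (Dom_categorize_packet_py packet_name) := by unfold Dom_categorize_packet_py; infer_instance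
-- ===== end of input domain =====

set_option maxRecDepth 40000

-- B replaces the eight per-category substring scans by the inverse algorithm: enumerate every substring of length 3..9 of the lowered name, look each up in a keyword->rank map, keep the minimum rank (alternative; same practical cost).


-- ===== PORT A =====
-- Port of A: lowercase once, then an explicit if/elif chain, one branch per category.
def categorize_packet_py (packet_name : String) : String :=
  let name_lower := PySem.Str.lower packet_name
  if ["move", "pos", "position", "coord", "location"].any (fun k => PySem.Str.isIn k name_lower) then "movement"
  else if ["chat", "msg", "whisper", "say", "shout"].any (fun k => PySem.Str.isIn k name_lower) then "chat"
  else if ["skill", "cast", "spell", "ability"].any (fun k => PySem.Str.isIn k name_lower) then "combat"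
  else if ["item", "inventory", "equip", "loot"].any (fun k => PySem.Str.isIn k name_lower) then "inventory"
  else if ["login", "auth", "logout", "connect"].any (fun k => PySem.Str.isIn k name_lower) then "authentication"
  else if ["npc", "quest", "shop", "trade"].any (fun k => PySem.Str.isIn k name_lower) then "interaction"
  else if ["party", "guild", "friend", "group"].any (fun k => PySem.Str.isIn k name_lower) then "social"
  else if ["zone", "map", "warp", "teleport"].any (fun k => PySem.Str.isIn k name_lower) then "world"
  else "unknown"

-- ===== PORT B =====
-- Port of B: keyword -> rank dict, category list indexed by rank; enumerate every
-- window name_lower[i:i+length] for length in range(3, 10), keep the minimum rank.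
def pvCategories : List String :=
  ["movement", "chat", "combat", "inventory", "authentication", "interaction", "social", "world"]

def pvKeywordRank : PySem.Dict String Int := PySem.Dict.ofList
  [ ("move", 0), ("pos", 0), ("position", 0), ("coord", 0), ("location", 0)
  , ("chat", 1), ("msg", 1), ("whisper", 1), ("say", 1), ("shout", 1)
  , ("skill", 2), ("cast", 2), ("spell", 2), ("ability", 2)
  , ("item", 3), ("inventory", 3), ("equip", 3), ("loot", 3)
  , ("login", 4), ("auth", 4), ("logout", 4), ("connect", 4)
  , ("npc", 5), ("quest", 5), ("shop", 5), ("trade", 5)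
  , ("party", 6), ("guild", 6), ("friend", 6), ("group", 6)
  , ("zone", 7), ("map", 7), ("warp", 7), ("teleport", 7) ]

def categorize_packet_py_alt (packet_name : String) : String :=
  let name_lower := PySem.Str.lower packet_name
  let best := (PySem.List.pyRange 0 (PySem.Str.len name_lower) 1).foldl (fun best i =>
      (PySem.List.pyRange 3 10 1).foldl (fun best length =>
        match pvKeywordRank.get? (PySem.Str.slice name_lower (some i) (some (i + length))) with
        | some rank => if rank < best then rank else best
        | none => best) best) 8
  -- 'return _CATEGORIES[best] if best < len(_CATEGORIES) else "unknown"' (index always in range under the guard)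
  if best < 8 then (PySem.List.pyGet? pvCategories best).getD "unknown" else "unknown"

-- ===== PRECONDITION & SPEC =====
def Spec_categorize_packet_py (packet_name : String) (out : String) : Prop := out = categorize_packet_py_alt packet_name
instance (packet_name : String) (out : String) : Decidable (Spec_categorize_packet_py packet_name out) := by unfold Spec_categorize_packet_py; infer_instance

-- ===== CLAIM =====
def Claim_equal_categorize_packet_py : Prop := ∀ (packet_name : String), Dom_categorize_packet_py packet_name → Spec_categorize_packet_py packet_name (categorize_packet_py packet_name)

-- ===== LEMMAS AND PROOFS =====

-- the same 34 (keyword, rank) pairs, as a plain list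
def pvTable : List (String × Int) :=
  [ ("move", 0), ("pos", 0), ("position", 0), ("coord", 0), ("location", 0)
  , ("chat", 1), ("msg", 1), ("whisper", 1), ("say", 1), ("shout", 1)
  , ("skill", 2), ("cast", 2), ("spell", 2), ("ability", 2)
  , ("item", 3), ("inventory", 3), ("equip", 3), ("loot", 3)
  , ("login", 4), ("auth", 4), ("logout", 4), ("connect", 4)
  , ("npc", 5), ("quest", 5), ("shop", 5), ("trade", 5)
  , ("party", 6), ("guild", 6), ("friend", 6), ("group", 6)
  , ("zone", 7), ("map", 7), ("warp", 7), ("teleport", 7) ]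

-- keywords of category rank r, in A's order
def pvCatKws : Int → List String
  | 0 => ["move", "pos", "position", "coord", "location"]
  | 1 => ["chat", "msg", "whisper", "say", "shout"]
  | 2 => ["skill", "cast", "spell", "ability"]
  | 3 => ["item", "inventory", "equip", "loot"]
  | 4 => ["login", "auth", "logout", "connect"]
  | 5 => ["npc", "quest", "shop", "trade"]
  | 6 => ["party", "guild", "friend", "group"]
  | 7 => ["zone", "map", "warp", "teleport"]
  | _ => []

-- "category r matches nl" — exactly A's r-th condition
def pvB (nl : String) (r : Int) : Bool := (pvCatKws r).any (fun k => PySem.Str.isIn k nl)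

def pvStep (b : Int) (w : String) : Int :=
  match pvKeywordRank.get? w with
  | some r => if r < b then r else b
  | none => b

-- all windows B inspects
def pvSubs (nl : String) : List String :=
  (PySem.List.pyRange 0 (PySem.Str.len nl) 1).flatMap (fun i =>
    (PySem.List.pyRange 3 10 1).map (fun L => PySem.Str.slice nl (some i) (some (i + L))))

lemma pvItems_rank : pvKeywordRank.items = pvTable := by decide

lemma pvTable_facts : ∀ p ∈ pvTable,
    3 ≤ p.1.toList.length ∧ p.1.toList.length ≤ 9 ∧ 0 ≤ p.2 ∧ p.2 < 8 ∧ p.1 ∈ pvCatKws p.2 := by decide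

lemma pvKw_mem_table : ∀ r ∈ ([0, 1, 2, 3, 4, 5, 6, 7] : List Int), ∀ k ∈ pvCatKws r,
    (k, r) ∈ pvTable ∧ pvKeywordRank.get? k = some r := by decide

lemma pvAlt_eq_fold (s : String) :
    categorize_packet_py_alt s =
      (if (pvSubs (PySem.Str.lower s)).foldl pvStep 8 < 8
       then (PySem.List.pyGet? pvCategories ((pvSubs (PySem.Str.lower s)).foldl pvStep 8)).getD "unknown"
       else "unknown") := by
  simp only [categorize_packet_py_alt, pvSubs, List.foldl_flatMap, List.foldl_map, pvStep]

lemma pvStep_le (b : Int) (w : String) : pvStep b w ≤ b := by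
  unfold pvStep
  cases pvKeywordRank.get? w with
  | none => exact le_refl b
  | some r => dsimp only; split <;> omega

lemma pvFold_le (ws : List String) (b : Int) : ws.foldl pvStep b ≤ b := by
  induction ws generalizing b with
  | nil => exact le_refl b
  | cons w ws ih => exact le_trans (ih (pvStep b w)) (pvStep_le b w)

lemma pvFold_le_of_mem {ws : List String} {w : String} {r : Int} (hw : w ∈ ws)
    (hr : pvKeywordRank.get? w = some r) (b : Int) : ws.foldl pvStep b ≤ r := by
  induction ws generalizing b with
  | nil => cases hw
  | cons x ws ih =>
    rcases List.mem_cons.mp hw with h | h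
    · subst h
      refine le_trans (pvFold_le ws (pvStep b w)) ?_
      unfold pvStep; rw [hr]; dsimp only; split <;> omega
    · exact ih h (pvStep b x)

lemma pvFold_cases (ws : List String) (b : Int) :
    ws.foldl pvStep b = b ∨ ∃ w ∈ ws, pvKeywordRank.get? w = some (ws.foldl pvStep b) := by
  induction ws generalizing b with
  | nil => exact Or.inl rfl
  | cons w ws ih =>
    rw [List.foldl_cons]
    rcases ih (pvStep b w) with h | ⟨x, hx, hgx⟩
    · rw [h]
      unfold pvStep
      cases hg : pvKeywordRank.get? w with
      | none => exact Or.inl rfl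
      | some r =>
        dsimp only
        split
        · exact Or.inr ⟨w, List.mem_cons_self, by rw [hg]⟩
        · exact Or.inl rfl
    · exact Or.inr ⟨x, List.mem_cons_of_mem _ hx, hgx⟩

-- every inspected window is a substring of nl
lemma pvIsIn_of_mem_subs {nl w : String} (hw : w ∈ pvSubs nl) : PySem.Str.isIn w nl = true := by
  rcases List.mem_flatMap.mp hw with ⟨i, hi, hw⟩
  rcases List.mem_map.mp hw with ⟨L, hL, rfl⟩
  rcases PySem.List.mem_pyRange_one.mp hi with ⟨hi0, _⟩
  rcases PySem.List.mem_pyRange_one.mp hL with ⟨hL3, _⟩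
  rw [PySem.Str.isIn_iff_infix, PySem.Str.toList_slice, PySem.Chars.slice_eq_listSlice,
    PySem.List.slice_toNat nl.toList hi0 (by omega)]
  exact ((List.take_prefix _ _).isInfix).trans (List.drop_suffix _ _).isInfix

-- every substring of length 3..9 is one of the inspected windows
lemma pvMem_subs_of_isIn {nl w : String} (h3 : 3 ≤ w.toList.length) (h9 : w.toList.length ≤ 9)
    (hin : PySem.Str.isIn w nl = true) : w ∈ pvSubs nl := by
  have hinf : w.toList <:+: nl.toList := (PySem.Str.isIn_iff_infix w nl).mp hin
  have : PySem.Chars.isIn w.toList nl.toList = true := (PySem.Chars.isIn_iff_infix _ _).mpr hinf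
  rcases (PySem.Chars.exists_prefix_drop_iff_isIn w.toList nl.toList).mpr this with ⟨j, hpre⟩
  have hj : j < nl.toList.length := by
    by_contra hge
    have : nl.toList.drop j = [] := List.drop_eq_nil_of_le (by omega)
    rw [this, List.prefix_nil] at hpre
    simp [hpre] at h3
  refine List.mem_flatMap.mpr ⟨(j : Int), ?_, ?_⟩
  · exact PySem.List.mem_pyRange_one.mpr ⟨by positivity, by rw [PySem.Str.len_eq]; exact_mod_cast hj⟩
  · refine List.mem_map.mpr ⟨(w.toList.length : Int), ?_, ?_⟩
    · exact PySem.List.mem_pyRange_one.mpr ⟨by exact_mod_cast h3, by exact_mod_cast Nat.lt_succ_of_le h9⟩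
    · rw [← String.toList_inj, PySem.Str.toList_slice, PySem.Chars.slice_eq_listSlice,
        PySem.List.slice_natCast_add]
      exact (List.prefix_iff_eq_take.mp hpre).symm

-- the fold's result is at most the rank of any matching category
lemma pvFold_le_of_B {nl : String} {r : Int} (hr : r ∈ ([0, 1, 2, 3, 4, 5, 6, 7] : List Int))
    (hB : pvB nl r = true) : (pvSubs nl).foldl pvStep 8 ≤ r := by
  rcases List.any_eq_true.mp hB with ⟨k, hk, hin⟩
  rcases pvKw_mem_table r hr k hk with ⟨htab, hget⟩
  rcases pvTable_facts _ htab with ⟨h3, h9, _, _, _⟩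
  exact pvFold_le_of_mem (pvMem_subs_of_isIn h3 h9 hin) hget 8

-- the fold's result is 8, or a rank whose category matches
lemma pvFold_result (nl : String) :
    (pvSubs nl).foldl pvStep 8 = 8 ∨
      (0 ≤ (pvSubs nl).foldl pvStep 8 ∧ (pvSubs nl).foldl pvStep 8 < 8 ∧
        pvB nl ((pvSubs nl).foldl pvStep 8) = true) := by
  rcases pvFold_cases (pvSubs nl) 8 with h | ⟨w, hw, hg⟩
  · exact Or.inl h
  · have hitems := PySem.Dict.mem_items_of_get?_eq_some pvKeywordRank hg
    rw [pvItems_rank] at hitems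
    rcases pvTable_facts _ hitems with ⟨_, _, h0, h8, hmem⟩
    refine Or.inr ⟨h0, h8, List.any_eq_true.mpr ⟨w, hmem, pvIsIn_of_mem_subs hw⟩⟩

-- ===== VERDICT =====
theorem categorize_packet_py_spec : Claim_equal_categorize_packet_py := by
  intro s _
  unfold Spec_categorize_packet_py
  rw [pvAlt_eq_fold]
  have hle : ∀ r ∈ ([0, 1, 2, 3, 4, 5, 6, 7] : List Int), pvB (PySem.Str.lower s) r = true →
      (pvSubs (PySem.Str.lower s)).foldl pvStep 8 ≤ r := fun r hr hB => pvFold_le_of_B hr hB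
  rcases pvFold_result (PySem.Str.lower s) with h8 | ⟨h0, h8, hB⟩
  · -- no category matches: both sides are "unknown"
    rw [if_neg (by omega)]
    have f0 : (["move", "pos", "position", "coord", "location"].any (fun k => PySem.Str.isIn k (PySem.Str.lower s))) = false := Bool.eq_false_iff.mpr (fun hb => by have := hle 0 (by decide) hb; omega)
    have f1 : (["chat", "msg", "whisper", "say", "shout"].any (fun k => PySem.Str.isIn k (PySem.Str.lower s))) = false := Bool.eq_false_iff.mpr (fun hb => by have := hle 1 (by decide) hb; omega)
    have f2 : (["skill", "cast", "spell", "ability"].any (fun k => PySem.Str.isIn k (PySem.Str.lower s))) = false := Bool.eq_false_iff.mpr (fun hb => by have := hle 2 (by decide) hb; omega)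
    have f3 : (["item", "inventory", "equip", "loot"].any (fun k => PySem.Str.isIn k (PySem.Str.lower s))) = false := Bool.eq_false_iff.mpr (fun hb => by have := hle 3 (by decide) hb; omega)
    have f4 : (["login", "auth", "logout", "connect"].any (fun k => PySem.Str.isIn k (PySem.Str.lower s))) = false := Bool.eq_false_iff.mpr (fun hb => by have := hle 4 (by decide) hb; omega)
    have f5 : (["npc", "quest", "shop", "trade"].any (fun k => PySem.Str.isIn k (PySem.Str.lower s))) = false := Bool.eq_false_iff.mpr (fun hb => by have := hle 5 (by decide) hb; omega)
    have f6 : (["party", "guild", "friend", "group"].any (fun k => PySem.Str.isIn k (PySem.Str.lower s))) = false := Bool.eq_false_iff.mpr (fun hb => by have := hle 6 (by decide) hb; omega)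
    have f7 : (["zone", "map", "warp", "teleport"].any (fun k => PySem.Str.isIn k (PySem.Str.lower s))) = false := Bool.eq_false_iff.mpr (fun hb => by have := hle 7 (by decide) hb; omega)
    simp only [categorize_packet_py]
    rw [f0, f1, f2, f3, f4, f5, f6, f7]
    simp
  · -- some category matches: the fold's result is the least matching rank
    generalize hgen : (pvSubs (PySem.Str.lower s)).foldl pvStep 8 = R at h0 h8 hB hle ⊢
    interval_cases R
    · rw [if_pos (by norm_num), show (PySem.List.pyGet? pvCategories 0).getD "unknown" = "movement" from by decide]
      have e0 : (["move", "pos", "position", "coord", "location"].any (fun k => PySem.Str.isIn k (PySem.Str.lower s))) = true := hB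
      simp only [categorize_packet_py]
      rw [e0]
      simp
    · rw [if_pos (by norm_num), show (PySem.List.pyGet? pvCategories 1).getD "unknown" = "chat" from by decide]
      have e1 : (["chat", "msg", "whisper", "say", "shout"].any (fun k => PySem.Str.isIn k (PySem.Str.lower s))) = true := hB
      have f0 : (["move", "pos", "position", "coord", "location"].any (fun k => PySem.Str.isIn k (PySem.Str.lower s))) = false := Bool.eq_false_iff.mpr (fun hb => by have := hle 0 (by decide) hb; omega)
      simp only [categorize_packet_py]
      rw [f0, e1]
      simp
    · rw [if_pos (by norm_num), show (PySem.List.pyGet? pvCategories 2).getD "unknown" = "combat" from by decide]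
      have e2 : (["skill", "cast", "spell", "ability"].any (fun k => PySem.Str.isIn k (PySem.Str.lower s))) = true := hB
      have f0 : (["move", "pos", "position", "coord", "location"].any (fun k => PySem.Str.isIn k (PySem.Str.lower s))) = false := Bool.eq_false_iff.mpr (fun hb => by have := hle 0 (by decide) hb; omega)
      have f1 : (["chat", "msg", "whisper", "say", "shout"].any (fun k => PySem.Str.isIn k (PySem.Str.lower s))) = false := Bool.eq_false_iff.mpr (fun hb => by have := hle 1 (by decide) hb; omega)
      simp only [categorize_packet_py]
      rw [f0, f1, e2]
      simp
    · rw [if_pos (by norm_num), show (PySem.List.pyGet? pvCategories 3).getD "unknown" = "inventory" from by decide]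
      have e3 : (["item", "inventory", "equip", "loot"].any (fun k => PySem.Str.isIn k (PySem.Str.lower s))) = true := hB
      have f0 : (["move", "pos", "position", "coord", "location"].any (fun k => PySem.Str.isIn k (PySem.Str.lower s))) = false := Bool.eq_false_iff.mpr (fun hb => by have := hle 0 (by decide) hb; omega)
      have f1 : (["chat", "msg", "whisper", "say", "shout"].any (fun k => PySem.Str.isIn k (PySem.Str.lower s))) = false := Bool.eq_false_iff.mpr (fun hb => by have := hle 1 (by decide) hb; omega)
      have f2 : (["skill", "cast", "spell", "ability"].any (fun k => PySem.Str.isIn k (PySem.Str.lower s))) = false := Bool.eq_false_iff.mpr (fun hb => by have := hle 2 (by decide) hb; omega)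
      simp only [categorize_packet_py]
      rw [f0, f1, f2, e3]
      simp
    · rw [if_pos (by norm_num), show (PySem.List.pyGet? pvCategories 4).getD "unknown" = "authentication" from by decide]
      have e4 : (["login", "auth", "logout", "connect"].any (fun k => PySem.Str.isIn k (PySem.Str.lower s))) = true := hB
      have f0 : (["move", "pos", "position", "coord", "location"].any (fun k => PySem.Str.isIn k (PySem.Str.lower s))) = false := Bool.eq_false_iff.mpr (fun hb => by have := hle 0 (by decide) hb; omega)
      have f1 : (["chat", "msg", "whisper", "say", "shout"].any (fun k => PySem.Str.isIn k (PySem.Str.lower s))) = false := Bool.eq_false_iff.mpr (fun hb => by have := hle 1 (by decide) hb; omega)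
      have f2 : (["skill", "cast", "spell", "ability"].any (fun k => PySem.Str.isIn k (PySem.Str.lower s))) = false := Bool.eq_false_iff.mpr (fun hb => by have := hle 2 (by decide) hb; omega)
      have f3 : (["item", "inventory", "equip", "loot"].any (fun k => PySem.Str.isIn k (PySem.Str.lower s))) = false := Bool.eq_false_iff.mpr (fun hb => by have := hle 3 (by decide) hb; omega)
      simp only [categorize_packet_py]
      rw [f0, f1, f2, f3, e4]
      simp
    · rw [if_pos (by norm_num), show (PySem.List.pyGet? pvCategories 5).getD "unknown" = "interaction" from by decide]
      have e5 : (["npc", "quest", "shop", "trade"].any (fun k => PySem.Str.isIn k (PySem.Str.lower s))) = true := hB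
      have f0 : (["move", "pos", "position", "coord", "location"].any (fun k => PySem.Str.isIn k (PySem.Str.lower s))) = false := Bool.eq_false_iff.mpr (fun hb => by have := hle 0 (by decide) hb; omega)
      have f1 : (["chat", "msg", "whisper", "say", "shout"].any (fun k => PySem.Str.isIn k (PySem.Str.lower s))) = false := Bool.eq_false_iff.mpr (fun hb => by have := hle 1 (by decide) hb; omega)
      have f2 : (["skill", "cast", "spell", "ability"].any (fun k => PySem.Str.isIn k (PySem.Str.lower s))) = false := Bool.eq_false_iff.mpr (fun hb => by have := hle 2 (by decide) hb; omega)
      have f3 : (["item", "inventory", "equip", "loot"].any (fun k => PySem.Str.isIn k (PySem.Str.lower s))) = false := Bool.eq_false_iff.mpr (fun hb => by have := hle 3 (by decide) hb; omega)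
      have f4 : (["login", "auth", "logout", "connect"].any (fun k => PySem.Str.isIn k (PySem.Str.lower s))) = false := Bool.eq_false_iff.mpr (fun hb => by have := hle 4 (by decide) hb; omega)
      simp only [categorize_packet_py]
      rw [f0, f1, f2, f3, f4, e5]
      simp
    · rw [if_pos (by norm_num), show (PySem.List.pyGet? pvCategories 6).getD "unknown" = "social" from by decide]
      have e6 : (["party", "guild", "friend", "group"].any (fun k => PySem.Str.isIn k (PySem.Str.lower s))) = true := hB
      have f0 : (["move", "pos", "position", "coord", "location"].any (fun k => PySem.Str.isIn k (PySem.Str.lower s))) = false := Bool.eq_false_iff.mpr (fun hb => by have := hle 0 (by decide) hb; omega)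
      have f1 : (["chat", "msg", "whisper", "say", "shout"].any (fun k => PySem.Str.isIn k (PySem.Str.lower s))) = false := Bool.eq_false_iff.mpr (fun hb => by have := hle 1 (by decide) hb; omega)
      have f2 : (["skill", "cast", "spell", "ability"].any (fun k => PySem.Str.isIn k (PySem.Str.lower s))) = false := Bool.eq_false_iff.mpr (fun hb => by have := hle 2 (by decide) hb; omega)
      have f3 : (["item", "inventory", "equip", "loot"].any (fun k => PySem.Str.isIn k (PySem.Str.lower s))) = false := Bool.eq_false_iff.mpr (fun hb => by have := hle 3 (by decide) hb; omega)
      have f4 : (["login", "auth", "logout", "connect"].any (fun k => PySem.Str.isIn k (PySem.Str.lower s))) = false := Bool.eq_false_iff.mpr (fun hb => by have := hle 4 (by decide) hb; omega)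
      have f5 : (["npc", "quest", "shop", "trade"].any (fun k => PySem.Str.isIn k (PySem.Str.lower s))) = false := Bool.eq_false_iff.mpr (fun hb => by have := hle 5 (by decide) hb; omega)
      simp only [categorize_packet_py]
      rw [f0, f1, f2, f3, f4, f5, e6]
      simp
    · rw [if_pos (by norm_num), show (PySem.List.pyGet? pvCategories 7).getD "unknown" = "world" from by decide]
      have e7 : (["zone", "map", "warp", "teleport"].any (fun k => PySem.Str.isIn k (PySem.Str.lower s))) = true := hB
      have f0 : (["move", "pos", "position", "coord", "location"].any (fun k => PySem.Str.isIn k (PySem.Str.lower s))) = false := Bool.eq_false_iff.mpr (fun hb => by have := hle 0 (by decide) hb; omega)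
      have f1 : (["chat", "msg", "whisper", "say", "shout"].any (fun k => PySem.Str.isIn k (PySem.Str.lower s))) = false := Bool.eq_false_iff.mpr (fun hb => by have := hle 1 (by decide) hb; omega)
      have f2 : (["skill", "cast", "spell", "ability"].any (fun k => PySem.Str.isIn k (PySem.Str.lower s))) = false := Bool.eq_false_iff.mpr (fun hb => by have := hle 2 (by decide) hb; omega)
      have f3 : (["item", "inventory", "equip", "loot"].any (fun k => PySem.Str.isIn k (PySem.Str.lower s))) = false := Bool.eq_false_iff.mpr (fun hb => by have := hle 3 (by decide) hb; omega)
      have f4 : (["login", "auth", "logout", "connect"].any (fun k => PySem.Str.isIn k (PySem.Str.lower s))) = false := Bool.eq_false_iff.mpr (fun hb => by have := hle 4 (by decide) hb; omega)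
      have f5 : (["npc", "quest", "shop", "trade"].any (fun k => PySem.Str.isIn k (PySem.Str.lower s))) = false := Bool.eq_false_iff.mpr (fun hb => by have := hle 5 (by decide) hb; omega)
      have f6 : (["party", "guild", "friend", "group"].any (fun k => PySem.Str.isIn k (PySem.Str.lower s))) = false := Bool.eq_false_iff.mpr (fun hb => by have := hle 6 (by decide) hb; omega)
      simp only [categorize_packet_py]
      rw [f0, f1, f2, f3, f4, f5, f6, e7]
      simp
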